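-- pv_equiv track=rewrite | github.com/981377660LMT/algorithm-study | 11_动态规划/lis最长上升子序列问题/每个数是否在lis中/LISOfSequnce.py | LISOfSequnce
-- ===== SOURCE A (Python) =====
-- from bisect import bisect_left, bisect_right
-- from typing import List, Sequence, Tuple
--
-- INF = int(2e18)
--
-- def LISOfSequnce(seq: List[int], strict=True) -> List[int]:
--     """每个元素是否在LIS中.
--     1: 不在LIS中
--     2: 在某些LIS中
--     3: 在所有LIS中
--     """
--     seq = seq[:]
--     lis, dp1 = lisDp(seq, strict)
--     seq = seq[::-1]
--     for i in range(len(seq)):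
--         seq[i] = -seq[i]
--     _, dp2 = lisDp(seq, strict)
--     dp2 = dp2[::-1]
--
--     n = len(seq)
--     counter = [0] * n
--     for i in range(n):
--         if dp1[i] + dp2[i] == lis:
--             counter[dp1[i]] += 1
--     res = [0] * n
--     for i in range(n):
--         if dp1[i] + dp2[i] < lis:
--             res[i] = 1
--         elif counter[dp1[i]] == 1:
--             res[i] = 3
--         else:
--             res[i] = 2
--     return res
--
-- def lisDp(seq: Sequence[int], strict=True) -> Tuple[int, Sequence[int]]:
--     """返回每个位置为结尾的LIS长度(不包括自身)."""
--     n = len(seq)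
--     dp = [INF] * n
--     lis = 0
--     lisRank = [0] * n
--     f = bisect_left if strict else bisect_right
--     for i, v in enumerate(seq):
--         pos = f(dp, v)
--         dp[pos] = v
--         lisRank[i] = pos
--         if lis < pos:
--             lis = pos
--     return lis, lisRank
-- ===== SOURCE B (Python) =====
-- def LISOfSequnce(seq, strict=True):
--     """1: in no LIS, 2: in some LIS, 3: in all LIS — by quadratic DP, no input mutation."""
--     if strict:
--         def lt(a, b): return a < b
--     else:
--         def lt(a, b): return a <= b
--     f = []  # f[i] = length of longest increasing subsequence ending at i (incl. i)
--     for v in seq: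
--         best = 0
--         for u, fu in zip(seq, f):  # scans the processed prefix
--             if lt(u, v) and fu > best:
--                 best = fu
--         f.append(best + 1)
--     g = []  # g[i] = same, starting at i, over the suffix
--     for i in range(len(seq) - 1, -1, -1):
--         v = seq[i]
--         best = 0
--         for u, gu in zip(seq[i + 1:], g):
--             if lt(v, u) and gu > best:
--                 best = gu
--         g.insert(0, best + 1)
--     L = max(f, default=0)
--     cnt = {}
--     for fi, gi in zip(f, g):
--         if fi + gi - 1 == L:
--             cnt[fi] = cnt.get(fi, 0) + 1
--     res = []
--     for fi, gi in zip(f, g):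
--         if fi + gi - 1 < L:
--             res.append(1)
--         elif cnt.get(fi, 0) == 1:
--             res.append(3)
--         else:
--             res.append(2)
--     return res
-- ===== Notes on version B (the rewrite author's own statement) =====
-- stated objective: alternative
-- what changed: Replaces the bisect-based patience-sorting LIS engine run twice on a reversed-and-negated copy by a direct O(n^2) forward/backward DP over the original list, with a dict counter per LIS level instead of an index-mutated array; B does not mutate or copy the input.
import Mathlib
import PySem

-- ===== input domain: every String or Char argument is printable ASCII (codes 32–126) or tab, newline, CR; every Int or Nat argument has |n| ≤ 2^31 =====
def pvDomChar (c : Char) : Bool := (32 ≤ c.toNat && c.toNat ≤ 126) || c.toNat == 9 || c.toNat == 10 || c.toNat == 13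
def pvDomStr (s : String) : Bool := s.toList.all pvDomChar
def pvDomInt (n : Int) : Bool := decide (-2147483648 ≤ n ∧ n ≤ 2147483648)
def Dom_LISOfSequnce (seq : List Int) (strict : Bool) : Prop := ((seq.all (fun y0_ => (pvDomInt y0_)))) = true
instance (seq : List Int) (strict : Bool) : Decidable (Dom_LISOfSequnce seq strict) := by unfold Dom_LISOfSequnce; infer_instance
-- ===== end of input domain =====

-- B replaces A's bisect-based patience-sorting engine (run twice, on a reversed negated copy)
-- by a direct quadratic forward/backward DP with a dict counter; same return value, B does not
-- mutate its argument (A only mutates a local copy, so side effects are identical).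

-- ===== PORT A =====
def pvINF : Int := 2000000000000000000   -- INF = int(2e18)

-- one iteration of the lisDp loop; state = (dp, lis, lisRank-so-far)
-- (Python preallocates lisRank = [0]*n and writes lisRank[i] = pos with i ascending:
--  appending pos builds the same list)
def lisStepA (strict : Bool) (st : List Int × Nat × List Nat) (v : Int) :
    List Int × Nat × List Nat :=
  let pos := if strict then PySem.List.bisectLeft st.1 v else PySem.List.bisectRight st.1 v
  (st.1.set pos v, if st.2.1 < pos then pos else st.2.1, st.2.2 ++ [pos])

def lisDpA (seq : List Int) (strict : Bool) : Nat × List Nat :=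
  let s := seq.foldl (lisStepA strict) (List.replicate seq.length pvINF, 0, [])
  (s.2.1, s.2.2)

def LISOfSequnce (seq : List Int) (strict : Bool) : List Int :=
  let p1 := lisDpA seq strict
  let lis := p1.1
  let dp1 := p1.2
  -- seq = seq[::-1]; for i in range(len(seq)): seq[i] = -seq[i]   (reverse, then negate each)
  let seq2 := (seq.reverse).map (fun x => -x)
  let dp2 := ((lisDpA seq2 strict).2).reverse
  let n := seq2.length
  -- counter[dp1[i]] += 1 when dp1[i] + dp2[i] == lis  (indices are nonnegative and in range)
  let counter := (List.range n).foldl (fun c i =>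
      if dp1.getD i 0 + dp2.getD i 0 = lis then
        c.set (dp1.getD i 0) (c.getD (dp1.getD i 0) 0 + 1)
      else c)
    (List.replicate n (0:Nat))
  -- res = [0]*n; res[i] = 1 / 3 / 2 with i ascending — built by appending
  (List.range n).foldl (fun r i =>
      r ++ [if dp1.getD i 0 + dp2.getD i 0 < lis then (1 : Int)
            else if counter.getD (dp1.getD i 0) 0 = 1 then 3 else 2]) []

-- ===== PORT B =====
def pvLt (strict : Bool) (a b : Int) : Bool := if strict then a < b else a ≤ b

-- inner loop of the forward DP: best f-value among earlier elements below v
def pvBest (strict : Bool) (acc : List (Int × Nat)) (v : Int) : Nat :=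
  acc.foldl (fun b p => if pvLt strict p.1 v && decide (b < p.2) then p.2 else b) 0

-- forward DP: pairs (value, f-value); f[i] = LIS length ending at i, inclusive
def pvFwdPairs (strict : Bool) (seq : List Int) : List (Int × Nat) :=
  seq.foldl (fun acc v => acc ++ [(v, pvBest strict acc v + 1)]) []

def pvFwd (strict : Bool) (seq : List Int) : List Nat :=
  (pvFwdPairs strict seq).map (·.2)

-- backward DP (Python's loop for i in range(n-1,-1,-1) = structural recursion from the right)
def pvBwd (strict : Bool) : List Int → List Nat
  | [] => []
  | v :: rest =>
    let g := pvBwd strict rest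
    (((rest.zip g).foldl (fun b p => if pvLt strict v p.1 && decide (b < p.2) then p.2 else b) 0)
      + 1) :: g

def LISOfSequnce_alt (seq : List Int) (strict : Bool) : List Int :=
  let f := pvFwd strict seq
  let g := pvBwd strict seq
  let L := f.foldl max 0          -- max(f, default=0)
  let cnt := (f.zip g).foldl (fun (d : PySem.Dict Nat Nat) p =>
      if p.1 + p.2 - 1 = L then d.insert p.1 (d.getD p.1 0 + 1) else d) PySem.Dict.empty
  (f.zip g).map (fun p =>
      if p.1 + p.2 - 1 < L then (1 : Int)
      else if cnt.getD p.1 0 = 1 then 3 else 2)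

-- ===== PRECONDITION & SPEC =====
def Spec_LISOfSequnce (seq : List Int) (strict : Bool) (out : List Int) : Prop :=
  out = LISOfSequnce_alt seq strict
instance (seq : List Int) (strict : Bool) (out : List Int) :
    Decidable (Spec_LISOfSequnce seq strict out) := by unfold Spec_LISOfSequnce; infer_instance

-- ===== CLAIM (what is proved, stated in full; the proofs are below) =====
def Claim_equal_LISOfSequnce : Prop := ∀ (seq : List Int) (strict : Bool),
  Dom_LISOfSequnce seq strict → Spec_LISOfSequnce seq strict (LISOfSequnce seq strict)

-- ===== LEMMAS AND PROOFS =====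

-- max of the second components, the semantic content of the two inner DP loops
def pvMaxSnd (l : List (Int × Nat)) : Nat := l.foldl (fun b p => max b p.2) 0

lemma pvMaxSnd_foldl (q : Int × Nat → Bool) (l : List (Int × Nat)) :
    l.foldl (fun b p => if q p && decide (b < p.2) then p.2 else b) 0
      = pvMaxSnd (l.filter q) := by
  have key : ∀ (a : Nat), l.foldl (fun b p => if q p && decide (b < p.2) then p.2 else b) a
      = (l.filter q).foldl (fun b p => max b p.2) a := by
    induction l with
    | nil => intro a; simp
    | cons p t ih =>
      intro a
      by_cases hq : q p = true
      · simp only [List.foldl_cons, hq, Bool.true_and]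
        rw [show (if decide (a < p.2) = true then p.2 else a) = max a p.2 by
          split_ifs with h <;> simp at h <;> omega]
        rw [ih]
        simp [hq]
      · have hq' : q p = false := by simpa using hq
        simp only [List.foldl_cons, hq', Bool.false_and, Bool.false_eq_true, if_false]
        rw [ih]
        simp [hq']
  simpa [pvMaxSnd] using key 0

lemma pvMaxSnd_le (l : List (Int × Nat)) : ∀ p ∈ l, p.2 ≤ pvMaxSnd l := by
  intro p hp
  simpa [pvMaxSnd] using (PySem.List.le_foldl_max_nat l (fun p => p.2) 0).2 p hp

lemma pvMaxSnd_attained (l : List (Int × Nat)) :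
    pvMaxSnd l = 0 ∨ ∃ p ∈ l, pvMaxSnd l = p.2 := by
  have key : ∀ (a : Nat), l.foldl (fun b p => max b p.2) a = a ∨
      ∃ p ∈ l, l.foldl (fun b p => max b p.2) a = p.2 := by
    induction l with
    | nil => intro a; exact Or.inl rfl
    | cons p t ih =>
      intro a
      rcases ih (max a p.2) with h | ⟨r, hr, h⟩
      · rcases Nat.le_total a p.2 with hle | hle
        · refine Or.inr ⟨p, List.mem_cons_self, ?_⟩
          simp only [List.foldl_cons]
          rw [h, Nat.max_eq_right hle]
        · refine Or.inl ?_
          simp only [List.foldl_cons]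
          rw [h, Nat.max_eq_left hle]
      · refine Or.inr ⟨r, List.mem_cons_of_mem _ hr, ?_⟩
        simpa [List.foldl_cons] using h
  simpa [pvMaxSnd] using key 0

lemma pvMaxSnd_reverse (l : List (Int × Nat)) : pvMaxSnd l.reverse = pvMaxSnd l := by
  have init : ∀ (t : List (Int × Nat)) (a c : Nat),
      t.foldl (fun b p => max b p.2) (max a c) = max (t.foldl (fun b p => max b p.2) a) c := by
    intro t
    induction t with
    | nil => intro a c; rfl
    | cons q t ih =>
      intro a c
      simp only [List.foldl_cons]
      rw [show max (max a c) q.2 = max (max a q.2) c by omega, ih]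
  have key : ∀ (a : Nat), l.reverse.foldl (fun b p => max b p.2) a
      = l.foldl (fun b p => max b p.2) a := by
    induction l with
    | nil => intro a; rfl
    | cons p t ih =>
      intro a
      simp only [List.reverse_cons, List.foldl_append, List.foldl_cons, List.foldl_nil, ih]
      rw [← init]
  simpa [pvMaxSnd] using key 0

lemma pvMaxSnd_map_fst (h : Int → Int) (l : List (Int × Nat)) :
    pvMaxSnd (l.map (fun p => (h p.1, p.2))) = pvMaxSnd l := by
  simp [pvMaxSnd, List.foldl_map]

-- Nat max commutes with subtraction of a constant
lemma pvFoldMax_sub (f : List Nat) (a : Nat) :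
    (f.map (· - 1)).foldl max (a - 1) = f.foldl max a - 1 := by
  induction f generalizing a with
  | nil => rfl
  | cons x t ih =>
    simp only [List.map_cons, List.foldl_cons]
    rw [show max (a - 1) (x - 1) = max a x - 1 by omega, ih]

-- pvLt is monotone on the left and implies ≤
lemma pvLt_le_trans (strict : Bool) {a b v : Int} (h : a ≤ b) (hb : pvLt strict b v = true) :
    pvLt strict a v = true := by
  cases strict <;> simp_all [pvLt] <;> omega

lemma pvLt_imp_le (strict : Bool) {a v : Int} (h : pvLt strict a v = true) : a ≤ v := by
  cases strict <;> simp_all [pvLt]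
  omega

lemma pvLt_neg (strict : Bool) (a v : Int) : pvLt strict (-a) (-v) = pvLt strict v a := by
  cases strict <;> simp [pvLt, neg_le_neg_iff]

-- sortedness is preserved by writing v at a position bounded below and above
lemma pvPairwise_set (dp : List Int) (pos : Nat) (v : Int)
    (h : List.Pairwise (· ≤ ·) dp)
    (hlo : ∀ j (hj : j < dp.length), j < pos → dp[j] ≤ v)
    (hhi : ∀ j (hj : j < dp.length), pos ≤ j → v ≤ dp[j]) :
    List.Pairwise (· ≤ ·) (dp.set pos v) := by
  rw [List.pairwise_iff_getElem] at h ⊢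
  intro i j hi hj hij
  have hi' : i < dp.length := by simpa using hi
  have hj' : j < dp.length := by simpa using hj
  rw [List.getElem_set, List.getElem_set]
  by_cases h1 : pos = i
  · have h2 : ¬ pos = j := by omega
    rw [if_pos h1, if_neg h2]
    exact hhi j hj' (by omega)
  · rw [if_neg h1]
    by_cases h2 : pos = j
    · rw [if_pos h2]
      exact hlo i hi' (by omega)
    · rw [if_neg h2]
      exact h i j hi' hj' hij

-- counting loop on a preallocated list: final cell r holds the number of keys equal to r
lemma pvCounterList_getD (keys : List Nat) (c0 : List Nat) (r : Nat)
    (hk : ∀ k ∈ keys, k < c0.length) :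
    (keys.foldl (fun c k => c.set k (c.getD k 0 + 1)) c0).getD r 0
      = c0.getD r 0 + keys.count r := by
  induction keys generalizing c0 with
  | nil => simp
  | cons k t ih =>
    have hk0 : k < c0.length := hk k List.mem_cons_self
    have hlen : (c0.set k (c0.getD k 0 + 1)).length = c0.length := by simp
    have hrec := ih (c0.set k (c0.getD k 0 + 1))
      (fun k' hk' => by rw [hlen]; exact hk k' (List.mem_cons_of_mem _ hk'))
    simp only [List.foldl_cons] at *
    rw [hrec]
    have hgetD : ∀ r', (c0.set k (c0.getD k 0 + 1)).getD r' 0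
        = if k = r' then c0.getD k 0 + 1 else c0.getD r' 0 := by
      intro r'
      simp only [List.getD, List.getElem?_set]
      split_ifs <;> simp_all
    rw [hgetD r, List.count_cons]
    by_cases hkr : k = r
    · simp [hkr]; omega
    · have : (k == r) = false := by simpa using hkr
      simp [hkr, this]

-- counting loop on a dict
lemma pvCounterDict_getD (keys : List Nat) (d0 : PySem.Dict Nat Nat) (r : Nat) :
    (keys.foldl (fun d k => d.insert k (d.getD k 0 + 1)) d0).getD r 0
      = d0.getD r 0 + keys.count r := by
  induction keys generalizing d0 with
  | nil => simp
  | cons k t ih =>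
    simp only [List.foldl_cons]
    rw [ih, PySem.Dict.getD_insert, List.count_cons]
    by_cases hkr : r = k
    · subst hkr
      simp only [BEq.rfl, if_true]
      omega
    · have hbeq : (k == r) = false := by
        simp [Ne.symm hkr]
      simp only [if_neg hkr, hbeq, Bool.false_eq_true, if_false]
      omega

-- the zip bridge: an index loop over two same-length lists is a loop over their zip
lemma pvRange_map_zip (f g : List Nat) (h : f.length = g.length) :
    (List.range f.length).map (fun i => (f.getD i 0, g.getD i 0)) = f.zip g := by
  apply List.ext_getElem
  · simp [h]
  · intro i h1 h2
    have hif : i < f.length := by simpa using h1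
    have hig : i < g.length := by omega
    simp only [List.getElem_map, List.getElem_range, List.getElem_zip]
    rw [List.getD_eq_getElem f 0 hif, List.getD_eq_getElem g 0 hig]

-- the invariant tying the patience state to the processed prefix of B-pairs
def pvInv (acc : List (Int × Nat)) (dp : List Int) : Prop :=
  List.Pairwise (· ≤ ·) dp ∧
  (∀ k (hk : k < acc.length),
     acc[k].2 - 1 ≤ k ∧ 1 ≤ acc[k].2 ∧ dp.getD (acc[k].2 - 1) 0 ≤ acc[k].1) ∧
  (∀ p, p < dp.length → dp.getD p 0 ≠ pvINF →
     ∃ k, ∃ hk : k < acc.length, acc[k].2 - 1 = p ∧ acc[k].1 = dp.getD p 0)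

-- pvBest never exceeds the number of processed elements (given the index bound on acc)
lemma pvBest_le (strict : Bool) (acc : List (Int × Nat)) (v : Int)
    (h : ∀ k (hk : k < acc.length), acc[k].2 ≤ k + 1) :
    pvBest strict acc v ≤ acc.length := by
  rw [show pvBest strict acc v = pvMaxSnd (acc.filter (fun p => pvLt strict p.1 v)) from
    pvMaxSnd_foldl _ acc]
  rcases pvMaxSnd_attained (acc.filter (fun p => pvLt strict p.1 v)) with h0 | ⟨p, hp, he⟩
  · omega
  · have hmem : p ∈ acc := List.mem_of_mem_filter hp
    rcases List.mem_iff_getElem.mp hmem with ⟨k, hk, hke⟩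
    rw [he, ← hke]
    have := h k hk
    omega

-- the crux: the bisect position equals B's inner-loop maximum
lemma pvPos_eq (strict : Bool) (acc : List (Int × Nat)) (dp : List Int) (v : Int)
    (hinv : pvInv acc dp) (hlen : acc.length < dp.length)
    (hv : -2147483648 ≤ v ∧ v ≤ 2147483648) :
    (if strict then PySem.List.bisectLeft dp v else PySem.List.bisectRight dp v)
      = pvBest strict acc v ∧ pvBest strict acc v ≤ acc.length ∧
    (∀ j (hj : j < dp.length), j < pvBest strict acc v → dp[j] ≤ v) ∧
    (∀ j (hj : j < dp.length), pvBest strict acc v ≤ j → v ≤ dp[j]) := by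
  obtain ⟨hsorted, h3, h4⟩ := hinv
  set pos := (if strict then PySem.List.bisectLeft dp v else PySem.List.bisectRight dp v)
    with hposdef
  have hspec : pos ≤ dp.length ∧
      (∀ j (hj : j < dp.length), j < pos → pvLt strict dp[j] v = true) ∧
      (∀ j (hj : j < dp.length), pos ≤ j → pvLt strict dp[j] v = false) := by
    cases strict
    · obtain ⟨a, b, c⟩ := PySem.List.bisectRight_spec dp v hsorted
      simp only [hposdef, if_neg (by simp : ¬ (false : Bool) = true)] at *
      refine ⟨a, ?_, ?_⟩ <;> intro j hj hh
      · have := b j hj hh; simp [pvLt]; omega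
      · have := c j hj hh; simp [pvLt]; omega
    · obtain ⟨a, b, c⟩ := PySem.List.bisectLeft_spec dp v hsorted
      simp only [hposdef] at *
      refine ⟨a, ?_, ?_⟩ <;> intro j hj hh
      · have := b j hj hh; simp [pvLt]; omega
      · have := c j hj hh; simp [pvLt]; omega
  obtain ⟨hple, hlow, hhigh⟩ := hspec
  have hbf : pvBest strict acc v
      = pvMaxSnd (acc.filter (fun p => pvLt strict p.1 v)) := pvMaxSnd_foldl _ acc
  -- every candidate's rank is below pos, hence best ≤ pos
  have hub : pvBest strict acc v ≤ pos := by
    rw [hbf]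
    rcases pvMaxSnd_attained (acc.filter (fun p => pvLt strict p.1 v)) with h0 | ⟨p, hp, he⟩
    · omega
    · have hmem : p ∈ acc := List.mem_of_mem_filter hp
      have hq : pvLt strict p.1 v = true := by simpa using (List.mem_filter.mp hp).2
      rcases List.mem_iff_getElem.mp hmem with ⟨k, hk, hke⟩
      obtain ⟨hr1, hr2, hr3⟩ := h3 k hk
      rw [hke] at hr1 hr2 hr3
      have hrlen : p.2 - 1 < dp.length := by omega
      rw [List.getD_eq_getElem dp 0 hrlen] at hr3
      have hplt : pvLt strict (dp[p.2 - 1]'hrlen) v = true := pvLt_le_trans strict hr3 hq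
      have hrlt : p.2 - 1 < pos := by
        by_contra hcon
        rw [hhigh (p.2 - 1) hrlen (by omega)] at hplt
        exact absurd hplt (by simp)
      omega
  -- pos = 0 or the tableau entry at pos-1 is achieved, giving pos ≤ best
  have hlb : pos ≤ pvBest strict acc v := by
    by_cases hp0 : pos = 0
    · omega
    · have hplen : pos - 1 < dp.length := by omega
      have hplt : pvLt strict (dp[pos - 1]'hplen) v = true := hlow (pos - 1) hplen (by omega)
      have hled : dp[pos - 1]'hplen ≤ v := pvLt_imp_le strict hplt
      have hne : dp.getD (pos - 1) 0 ≠ pvINF := by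
        rw [List.getD_eq_getElem dp 0 hplen]
        intro hcon
        rw [hcon] at hled
        simp [pvINF] at hled
        omega
      obtain ⟨k, hk, hrank, hval⟩ := h4 (pos - 1) hplen hne
      rw [List.getD_eq_getElem dp 0 hplen] at hval
      have hmemf : acc[k] ∈ acc.filter (fun p => pvLt strict p.1 v) := by
        rw [List.mem_filter]
        exact ⟨List.getElem_mem hk, by rw [hval]; exact hplt⟩
      have := pvMaxSnd_le _ _ hmemf
      obtain ⟨hr1, hr2, hr3⟩ := h3 k hk
      rw [hbf]
      omega
  have heq : pos = pvBest strict acc v := by omega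
  have hba : pvBest strict acc v ≤ acc.length :=
    pvBest_le strict acc v (fun k hk => by have := h3 k hk; omega)
  refine ⟨heq, hba, ?_, ?_⟩
  · intro j hj hjp
    exact pvLt_imp_le strict (hlow j hj (by omega))
  · intro j hj hjp
    have hf : pvLt strict (dp[j]'hj) v = false := hhigh j hj (by omega)
    cases strict <;> simp [pvLt] at hf <;> omega

-- main induction: A's fold over the rest equals B's fold, ranks and running max
lemma pvMainA (strict : Bool) : ∀ (rest : List Int) (acc : List (Int × Nat)) (dp : List Int)
    (lis : Nat),
    (∀ v ∈ rest, -2147483648 ≤ v ∧ v ≤ 2147483648) →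
    acc.length + rest.length ≤ dp.length →
    pvInv acc dp →
    lis = (acc.map (fun p => p.2 - 1)).foldl max 0 →
    (rest.foldl (lisStepA strict) (dp, lis, acc.map (fun p => p.2 - 1))).2.2
        = (rest.foldl (fun a v => a ++ [(v, pvBest strict a v + 1)]) acc).map (fun p => p.2 - 1)
    ∧ (rest.foldl (lisStepA strict) (dp, lis, acc.map (fun p => p.2 - 1))).2.1
        = ((rest.foldl (fun a v => a ++ [(v, pvBest strict a v + 1)]) acc).map
            (fun p => p.2 - 1)).foldl max 0 := by
  intro rest
  induction rest with
  | nil =>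
    intro acc dp lis hb hroom hinv hlis
    exact ⟨rfl, hlis⟩
  | cons v rest ih =>
    intro acc dp lis hb hroom hinv hlis
    have hv := hb v List.mem_cons_self
    have hlen : acc.length < dp.length := by
      simp only [List.length_cons] at hroom; omega
    obtain ⟨heq, hba, hlo, hhi⟩ := pvPos_eq strict acc dp v hinv hlen hv
    obtain ⟨hsorted, h3, h4⟩ := hinv
    set best := pvBest strict acc v with hbestdef
    have hposlt : best < dp.length := by omega
    have hstepA : lisStepA strict (dp, lis, acc.map (fun p => p.2 - 1)) v
        = (dp.set best v, max lis best, (acc.map (fun p => p.2 - 1)) ++ [best]) := by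
      simp only [lisStepA, heq]
      rw [show (if lis < best then best else lis) = max lis best from by split_ifs <;> omega]
    rw [List.foldl_cons, List.foldl_cons, hstepA]
    have hmap' : (acc.map (fun p => p.2 - 1)) ++ [best]
        = (acc ++ [(v, best + 1)]).map (fun p => p.2 - 1) := by simp
    rw [hmap']
    have hlen' : (acc ++ [(v, best + 1)]).length = acc.length + 1 := by simp
    have hdplen : (dp.set best v).length = dp.length := by simp
    have hlast : (acc ++ [(v, best + 1)])[acc.length]'(by omega) = (v, best + 1) := by
      rw [List.getElem_append_right (by omega)]
      simp
    have hget' : (dp.set best v).getD best 0 = v := by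
      rw [List.getD_eq_getElem _ 0 (by omega), List.getElem_set, if_pos rfl]
    -- invariant is preserved
    have hinv' : pvInv (acc ++ [(v, best + 1)]) (dp.set best v) := by
      refine ⟨pvPairwise_set dp best v hsorted hlo hhi, ?_, ?_⟩
      · intro k hk
        rw [hlen'] at hk
        by_cases hkl : k < acc.length
        · rw [List.getElem_append_left hkl]
          obtain ⟨hr1, hr2, hr3⟩ := h3 k hkl
          have hrlen : acc[k].2 - 1 < dp.length := by omega
          rw [List.getD_eq_getElem dp 0 hrlen] at hr3
          refine ⟨hr1, hr2, ?_⟩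
          rw [List.getD_eq_getElem _ 0 (by omega), List.getElem_set]
          by_cases hrb : best = acc[k].2 - 1
          · rw [if_pos hrb]
            have hvle : v ≤ dp[acc[k].2 - 1]'hrlen := by
              have := hhi (acc[k].2 - 1) hrlen (by omega)
              exact this
            omega
          · rw [if_neg hrb]
            exact hr3
        · have hke : k = acc.length := by omega
          subst hke
          rw [hlast]
          refine ⟨by simpa using hba, by omega, ?_⟩
          have : best + 1 - 1 = best := by omega
          rw [this, hget']
      · intro p hp hne
        have hplen : p < dp.length := by omega
        rw [List.getD_eq_getElem _ 0 (by omega), List.getElem_set] at hne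
        by_cases hpb : best = p
        · refine ⟨acc.length, by omega, ?_, ?_⟩
          · rw [hlast]; simp; omega
          · rw [hlast, List.getD_eq_getElem _ 0 (by omega), List.getElem_set, if_pos hpb]
        · rw [if_neg hpb] at hne
          have hne' : dp.getD p 0 ≠ pvINF := by
            rw [List.getD_eq_getElem dp 0 hplen]; exact hne
          obtain ⟨k, hk, hr, hv'⟩ := h4 p hplen hne'
          refine ⟨k, by omega, ?_, ?_⟩
          · rw [List.getElem_append_left hk]
            exact hr
          · rw [List.getElem_append_left hk]
            rw [List.getD_eq_getElem _ 0 (by omega), List.getElem_set, if_neg hpb]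
            rw [List.getD_eq_getElem dp 0 hplen] at hv'
            exact hv'
    refine ih (acc ++ [(v, best + 1)]) (dp.set best v) (max lis best)
      (fun w hw => hb w (List.mem_cons_of_mem _ hw)) ?_ hinv' ?_
    · rw [hdplen, hlen']
      simp only [List.length_cons] at hroom
      omega
    · rw [← hmap']
      rw [List.foldl_append, hlis]
      simp

-- corollary: lisDp's outputs in terms of the forward DP
lemma pvLisDpA_eq (seq : List Int) (strict : Bool)
    (hb : ∀ v ∈ seq, -2147483648 ≤ v ∧ v ≤ 2147483648) :
    (lisDpA seq strict).2 = (pvFwd strict seq).map (· - 1) ∧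
    (lisDpA seq strict).1 = ((pvFwd strict seq).map (· - 1)).foldl max 0 := by
  have hinv0 : pvInv [] (List.replicate seq.length pvINF) := by
    refine ⟨?_, ?_, ?_⟩
    · rw [List.pairwise_replicate]
      right
      exact le_refl _
    · intro k hk
      simp at hk
    · intro p hp hne
      rw [List.getD_replicate _ (by simpa using hp)] at hne
      exact absurd rfl hne
  have h := pvMainA strict seq [] (List.replicate seq.length pvINF) 0 hb (by simp) hinv0
    (by simp)
  simp only [List.map_nil] at h
  constructor
  · rw [show (lisDpA seq strict).2
        = (seq.foldl (lisStepA strict) (List.replicate seq.length pvINF, 0, [])).2.2 from rfl]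
    rw [h.1]
    simp only [pvFwd, pvFwdPairs, List.map_map, Function.comp_def]
  · rw [show (lisDpA seq strict).1
        = (seq.foldl (lisStepA strict) (List.replicate seq.length pvINF, 0, [])).2.1 from rfl]
    rw [h.2]
    simp only [pvFwd, pvFwdPairs, List.map_map, Function.comp_def]

lemma pvFwdAux_length (strict : Bool) : ∀ (seq : List Int) (acc : List (Int × Nat)),
    (seq.foldl (fun a v => a ++ [(v, pvBest strict a v + 1)]) acc).length
      = acc.length + seq.length := by
  intro seq
  induction seq with
  | nil => intro acc; simp
  | cons v rest ih =>
    intro acc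
    simp only [List.foldl_cons]
    rw [ih]
    simp
    omega

-- structure facts about the DPs
lemma pvFwdPairs_length (strict : Bool) (seq : List Int) :
    (pvFwdPairs strict seq).length = seq.length := by
  simpa using pvFwdAux_length strict seq []

lemma pvBwd_length (strict : Bool) (seq : List Int) :
    (pvBwd strict seq).length = seq.length := by
  induction seq with
  | nil => rfl
  | cons v rest ih => simp [pvBwd, ih]

lemma pvFwdPairs_one_le (strict : Bool) (seq : List Int) :
    ∀ p ∈ pvFwdPairs strict seq, 1 ≤ p.2 := by
  have key : ∀ (s : List Int) (acc : List (Int × Nat)), (∀ p ∈ acc, 1 ≤ p.2) →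
      ∀ p ∈ s.foldl (fun a v => a ++ [(v, pvBest strict a v + 1)]) acc, 1 ≤ p.2 := by
    intro s
    induction s with
    | nil => intro acc h; simpa using h
    | cons v rest ih =>
      intro acc h
      simp only [List.foldl_cons]
      refine ih _ ?_
      intro p hp
      rcases List.mem_append.mp hp with h1 | h1
      · exact h p h1
      · rcases List.mem_singleton.mp h1 with rfl
        simp
  exact key seq [] (by simp)

lemma pvBwd_one_le (strict : Bool) (seq : List Int) : ∀ x ∈ pvBwd strict seq, 1 ≤ x := by
  induction seq with
  | nil => simp [pvBwd]
  | cons v rest ih =>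
    intro x hx
    simp only [pvBwd] at hx
    rcases List.mem_cons.mp hx with h | h
    · omega
    · exact ih x h

lemma pvFwdPairs_le_idx (strict : Bool) (seq : List Int) :
    ∀ k (hk : k < (pvFwdPairs strict seq).length), (pvFwdPairs strict seq)[k].2 ≤ k + 1 := by
  have key : ∀ (s : List Int) (acc : List (Int × Nat)),
      (∀ k (hk : k < acc.length), acc[k].2 ≤ k + 1) →
      ∀ k (hk : k < (s.foldl (fun a v => a ++ [(v, pvBest strict a v + 1)]) acc).length),
        (s.foldl (fun a v => a ++ [(v, pvBest strict a v + 1)]) acc)[k].2 ≤ k + 1 := by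
    intro s
    induction s with
    | nil => intro acc h; simpa using h
    | cons v rest ih =>
      intro acc h
      simp only [List.foldl_cons]
      refine ih _ ?_
      intro k hk
      simp only [List.length_append, List.length_cons, List.length_nil] at hk
      by_cases hlt : k < acc.length
      · rw [List.getElem_append_left hlt]
        exact h k hlt
      · have hke : k = acc.length := by omega
        subst hke
        rw [List.getElem_append_right (by omega)]
        simp only [Nat.sub_self, List.getElem_cons_zero]
        have := pvBest_le strict acc v h
        omega
  exact key seq [] (by simp)

-- the reversal bridge: forward DP of the reversed, negated list = backward DP, reversed
lemma pvRevPairs (strict : Bool) : ∀ (seq : List Int),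
    pvFwdPairs strict ((seq.reverse).map (fun x => -x))
      = ((seq.zip (pvBwd strict seq)).map (fun p => (-p.1, p.2))).reverse := by
  intro seq
  induction seq with
  | nil => rfl
  | cons v rest ih =>
    have happ : ∀ (xs : List Int) (u : Int), pvFwdPairs strict (xs ++ [u])
        = pvFwdPairs strict xs ++ [(u, pvBest strict (pvFwdPairs strict xs) u + 1)] := by
      intro xs u
      simp only [pvFwdPairs, List.foldl_append, List.foldl_cons, List.foldl_nil]
    have hlrev : ((v :: rest).reverse).map (fun x : Int => -x)
        = (rest.reverse).map (fun x => -x) ++ [-v] := by simp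
    rw [hlrev, happ, ih]
    have hbwd : pvBwd strict (v :: rest)
        = (((rest.zip (pvBwd strict rest)).foldl
            (fun b p => if pvLt strict v p.1 && decide (b < p.2) then p.2 else b) 0) + 1)
          :: pvBwd strict rest := rfl
    rw [hbwd]
    simp only [List.zip_cons_cons, List.map_cons, List.reverse_cons]
    -- the two inner maxima agree
    have key : pvBest strict
          (((rest.zip (pvBwd strict rest)).map (fun p => (-p.1, p.2))).reverse) (-v)
        = (rest.zip (pvBwd strict rest)).foldl
            (fun b p => if pvLt strict v p.1 && decide (b < p.2) then p.2 else b) 0 := by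
      rw [show pvBest strict
            (((rest.zip (pvBwd strict rest)).map (fun p => (-p.1, p.2))).reverse) (-v)
          = pvMaxSnd (((((rest.zip (pvBwd strict rest)).map
              (fun p => (-p.1, p.2))).reverse)).filter (fun p => pvLt strict p.1 (-v))) from
        pvMaxSnd_foldl _ _]
      rw [pvMaxSnd_foldl (fun p => pvLt strict v p.1) (rest.zip (pvBwd strict rest))]
      rw [List.filter_reverse, pvMaxSnd_reverse, List.filter_map]
      have hpred : ((fun p => pvLt strict p.1 (-v)) ∘ (fun p : Int × Nat => (-p.1, p.2)))
          = (fun p : Int × Nat => pvLt strict v p.1) := by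
        funext p
        simp only [Function.comp]
        exact pvLt_neg strict p.1 v
      rw [hpred, pvMaxSnd_map_fst]
    rw [key]

lemma pvRangeMapPair {γ : Type} (F G : List Nat) (h : F.length = G.length)
    (u : Nat × Nat → γ) :
    (List.range F.length).map (fun i => u (F.getD i 0, G.getD i 0)) = (F.zip G).map u := by
  rw [← pvRange_map_zip F G h, List.map_map]
  rfl

lemma pvRangeFoldPair {δ : Type} (F G : List Nat) (h : F.length = G.length)
    (st : δ → Nat × Nat → δ) (init : δ) :
    (List.range F.length).foldl (fun c i => st c (F.getD i 0, G.getD i 0)) init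
      = (F.zip G).foldl st init := by
  rw [← pvRange_map_zip F G h, List.foldl_map]

-- ===== VERDICT (by name: the statement is the Claim_ definition above) =====
theorem LISOfSequnce_spec : Claim_equal_LISOfSequnce := by
  intro seq strict hdom
  unfold Spec_LISOfSequnce
  have hb : ∀ v ∈ seq, -2147483648 ≤ v ∧ v ≤ 2147483648 := by
    intro v hv
    have h := List.all_eq_true.mp hdom v hv
    simpa [pvDomInt] using h
  have hb2 : ∀ v ∈ (seq.reverse).map (fun x : Int => -x),
      -2147483648 ≤ v ∧ v ≤ 2147483648 := by
    intro v hv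
    rw [List.mem_map] at hv
    obtain ⟨w, hw, rfl⟩ := hv
    have := hb w (List.mem_reverse.mp hw)
    omega
  have hfl : (pvFwd strict seq).length = seq.length := by
    rw [pvFwd, List.length_map, pvFwdPairs_length]
  have hgl : (pvBwd strict seq).length = seq.length := pvBwd_length strict seq
  have hf1 : ∀ x ∈ pvFwd strict seq, 1 ≤ x := by
    intro x hx
    rw [pvFwd, List.mem_map] at hx
    obtain ⟨p, hp, rfl⟩ := hx
    exact pvFwdPairs_one_le strict seq p hp
  have hg1 := pvBwd_one_le strict seq
  have hfle : ∀ i (hi : i < (pvFwd strict seq).length), (pvFwd strict seq)[i] ≤ i + 1 := by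
    intro i hi
    simp only [pvFwd, List.getElem_map]
    exact pvFwdPairs_le_idx strict seq i (by simpa [pvFwd] using hi)
  have hdp1 : (lisDpA seq strict).2 = (pvFwd strict seq).map (· - 1) :=
    (pvLisDpA_eq seq strict hb).1
  have hlis : (lisDpA seq strict).1 = ((pvFwd strict seq).map (· - 1)).foldl max 0 :=
    (pvLisDpA_eq seq strict hb).2
  have hlisL : ((pvFwd strict seq).map (· - 1)).foldl max 0
      = (pvFwd strict seq).foldl max 0 - 1 := by
    simpa using pvFoldMax_sub (pvFwd strict seq) 0
  have hdp2 : ((lisDpA ((seq.reverse).map (fun x => -x)) strict).2).reverse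
      = (pvBwd strict seq).map (· - 1) := by
    rw [(pvLisDpA_eq _ strict hb2).1]
    have hsnd : pvFwd strict ((seq.reverse).map (fun x => -x))
        = (pvBwd strict seq).reverse := by
      rw [pvFwd, pvRevPairs strict seq, List.map_reverse, List.map_map]
      have hcomp : ((fun x : Int × Nat => x.2) ∘ (fun p : Int × Nat => (-p.1, p.2)))
          = Prod.snd := by funext p; rfl
      rw [hcomp, List.map_snd_zip (by omega)]
    rw [hsnd, ← List.map_reverse, List.reverse_reverse]
  have hn : ((seq.reverse).map (fun x : Int => -x)).length = seq.length := by simp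
  simp only [LISOfSequnce, LISOfSequnce_alt]
  rw [hdp1, hlis, hdp2, hlisL, hn]
  set f := pvFwd strict seq with hfdef
  set g := pvBwd strict seq with hgdef
  set F := f.map (· - 1) with hFdef
  set G := g.map (· - 1) with hGdef
  set L := f.foldl max 0 with hLdef
  have hFlen : F.length = seq.length := by rw [hFdef, List.length_map, hfl]
  have hGlen : G.length = seq.length := by rw [hGdef, List.length_map, hgl]
  have hFG : F.length = G.length := by omega
  -- index loops over range n become loops over the zips
  rw [show seq.length = F.length from hFlen.symm]
  rw [pvRangeFoldPair F G hFG
    (fun c p => if p.1 + p.2 = L - 1 then c.set p.1 (c.getD p.1 0 + 1) else c)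
    (List.replicate F.length (0 : Nat))]
  rw [PySem.List.foldl_append_singleton_eq_map, List.nil_append]
  rw [pvRangeMapPair F G hFG (fun p : Nat × Nat =>
    if p.1 + p.2 < L - 1 then (1 : Int)
    else if ((F.zip G).foldl
        (fun c p => if p.1 + p.2 = L - 1 then c.set p.1 (c.getD p.1 0 + 1) else c)
        (List.replicate F.length (0 : Nat))).getD p.1 0 = 1 then 3 else 2)]
  have hzip : F.zip G = (f.zip g).map (Prod.map (· - 1) (· - 1)) := by
    rw [hFdef, hGdef, List.zip_map]
  rw [hzip, List.foldl_map, List.map_map]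
  have hmemzip : ∀ p ∈ f.zip g, 1 ≤ p.1 ∧ 1 ≤ p.2 ∧ p.1 ≤ L ∧ 1 ≤ L := by
    intro p hp
    obtain ⟨h1, h2⟩ := List.of_mem_zip (a := p.1) (b := p.2) (by simpa using hp)
    have ha := hf1 p.1 h1
    have hbb := hg1 p.2 h2
    have hL := (PySem.List.le_foldl_max f 0).2 p.1 h1
    exact ⟨ha, hbb, hL, by omega⟩
  have hkeysB1 : ∀ x ∈ ((f.zip g).filter
      (fun p : Nat × Nat => decide (p.1 + p.2 - 1 = L))).map (fun q : Nat × Nat => q.1),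
      1 ≤ x := by
    intro x hx
    rw [List.mem_map] at hx
    obtain ⟨q, hq, rfl⟩ := hx
    obtain ⟨h1, _⟩ := List.of_mem_zip (a := q.1) (b := q.2)
      (by simpa using List.mem_of_mem_filter hq)
    exact hf1 q.1 h1
  -- pointwise agreement on the zip
  apply List.map_congr_left
  intro p hp
  obtain ⟨a, b⟩ := p
  obtain ⟨h1, h2, h3, h4⟩ := hmemzip (a, b) hp
  have haf : a ∈ f := (List.of_mem_zip (by simpa using hp)).1
  simp only [Function.comp, Prod.map]
  by_cases hcond : a + b - 1 < L
  · rw [if_pos (by omega : a - 1 + (b - 1) < L - 1), if_pos hcond]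
  · rw [if_neg (by omega : ¬ (a - 1 + (b - 1) < L - 1)), if_neg hcond]
    -- both count cells: reduce each counter to a count over the same key list
    have hcntA :
        ((f.zip g).foldl
          (fun c p => if p.1 - 1 + (p.2 - 1) = L - 1
            then c.set (p.1 - 1) (c.getD (p.1 - 1) 0 + 1) else c)
          (List.replicate F.length (0 : Nat))).getD (a - 1) 0
        = (((f.zip g).filter (fun p : Nat × Nat => decide (p.1 + p.2 - 1 = L))).map
            (fun q : Nat × Nat => q.1)).count a := by
      rw [PySem.List.foldl_ite_eq_foldl_filter
        (fun p : Nat × Nat => p.1 - 1 + (p.2 - 1) = L - 1)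
        (fun (c : List Nat) p => c.set (p.1 - 1) (c.getD (p.1 - 1) 0 + 1)) (f.zip g) _]
      have hfiltereq : (f.zip g).filter
          (fun p : Nat × Nat => decide (p.1 - 1 + (p.2 - 1) = L - 1))
          = (f.zip g).filter (fun p : Nat × Nat => decide (p.1 + p.2 - 1 = L)) := by
        apply List.filter_congr
        intro q hq
        obtain ⟨j1, j2, j3, j4⟩ := hmemzip q hq
        rw [decide_eq_decide]
        omega
      rw [hfiltereq]
      rw [show ((f.zip g).filter
            (fun p : Nat × Nat => decide (p.1 + p.2 - 1 = L))).foldl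
          (fun c p => c.set (p.1 - 1) (c.getD (p.1 - 1) 0 + 1))
          (List.replicate F.length (0 : Nat))
        = (((f.zip g).filter (fun p : Nat × Nat => decide (p.1 + p.2 - 1 = L))).map
            (fun q : Nat × Nat => q.1 - 1)).foldl
          (fun (c : List Nat) (k : Nat) => c.set k (c.getD k 0 + 1))
          (List.replicate F.length (0 : Nat)) from
        (List.foldl_map (f := fun q : Nat × Nat => q.1 - 1)
          (g := fun (c : List Nat) (k : Nat) => c.set k (c.getD k 0 + 1))).symm]
      have hkeyslt : ∀ k ∈ ((f.zip g).filter
          (fun p : Nat × Nat => decide (p.1 + p.2 - 1 = L))).map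
          (fun q : Nat × Nat => q.1 - 1),
          k < (List.replicate F.length (0 : Nat)).length := by
        intro k hk
        rw [List.mem_map] at hk
        obtain ⟨q, hq, rfl⟩ := hk
        have hq1 : q.1 ∈ f := by
          obtain ⟨j1, _⟩ := List.of_mem_zip (a := q.1) (b := q.2)
            (by simpa using List.mem_of_mem_filter hq)
          exact j1
        obtain ⟨i, hi, hie⟩ := List.mem_iff_getElem.mp hq1
        have := hfle i hi
        rw [List.length_replicate, hFlen, ← hfl]
        omega
      rw [pvCounterList_getD _ _ _ hkeyslt]
      have hrlt : a - 1 < F.length := by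
        obtain ⟨i, hi, hie⟩ := List.mem_iff_getElem.mp haf
        have := hfle i hi
        rw [hFlen, ← hfl]
        omega
      rw [List.getD_replicate _ (by simpa using hrlt)]
      rw [show ((f.zip g).filter
            (fun p : Nat × Nat => decide (p.1 + p.2 - 1 = L))).map
          (fun q : Nat × Nat => q.1 - 1)
        = (((f.zip g).filter (fun p : Nat × Nat => decide (p.1 + p.2 - 1 = L))).map
            (fun q : Nat × Nat => q.1)).map (· - 1) from by rw [List.map_map]; rfl]
      rw [List.count_eq_countP, List.countP_map, List.count_eq_countP]
      rw [List.countP_congr (q := fun x => x == a) ?_]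
      · omega
      · intro x hx
        have hx1 := hkeysB1 x hx
        simp only [Function.comp, beq_iff_eq]
        omega
    have hcntB :
        ((f.zip g).foldl
          (fun (d : PySem.Dict Nat Nat) p =>
            if p.1 + p.2 - 1 = L then d.insert p.1 (d.getD p.1 0 + 1) else d)
          PySem.Dict.empty).getD a 0
        = (((f.zip g).filter (fun p : Nat × Nat => decide (p.1 + p.2 - 1 = L))).map
            (fun q : Nat × Nat => q.1)).count a := by
      rw [PySem.List.foldl_ite_eq_foldl_filter
        (fun p : Nat × Nat => p.1 + p.2 - 1 = L)
        (fun (d : PySem.Dict Nat Nat) p => d.insert p.1 (d.getD p.1 0 + 1)) (f.zip g) _]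
      rw [show ((f.zip g).filter
            (fun p : Nat × Nat => decide (p.1 + p.2 - 1 = L))).foldl
          (fun (d : PySem.Dict Nat Nat) p => d.insert p.1 (d.getD p.1 0 + 1))
          PySem.Dict.empty
        = (((f.zip g).filter (fun p : Nat × Nat => decide (p.1 + p.2 - 1 = L))).map
            (fun q : Nat × Nat => q.1)).foldl
          (fun (d : PySem.Dict Nat Nat) (k : Nat) => d.insert k (d.getD k 0 + 1))
          PySem.Dict.empty from
        (List.foldl_map (f := fun q : Nat × Nat => q.1)
          (g := fun (d : PySem.Dict Nat Nat) (k : Nat) =>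
            d.insert k (d.getD k 0 + 1))).symm]
      rw [pvCounterDict_getD]
      simp [PySem.Dict.empty, PySem.Dict.getD, PySem.Dict.get?]
    rw [hcntA, hcntB]
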